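-- pv_equiv track=rewrite | github.com/johnyunfanzhou/hvac_LR | hvac_LoadData.py | generate_features
-- ===== SOURCE A (Python) =====
-- def generate_features(data, k, HISTORY = None):
--     '''
--     Given training data (data) and training degree (k),
--     output the feature matrix
--     If discontinuous data is detected, use history average (HISTORY) to guess
--     the missing data.
--     If there is no history average (HISTORY == None), delete the sample.
--     '''
--     datasize = len(data);
--     X = [];
--     for i in range (datasize):
--         x = [];
--         x.append(data[i][2]);
--         x.append(data[i][3]);
--         x.append(data[i][4]);
--         n = i;
--         datacontinuous = True;
--         for j in range (k):
--             if datacontinuous: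
--                 if (n == 1):
--                     datacontinuous = False;
--                 elif ((data[n][3] - data[n - 1][3]) % 48 != 1):
--                     datacontinuous = False;
--                 elif (data[n][3] != 0):
--                     if ((data[n][2] != data[n - 1][2]) or (data[n][4] != data[n - 1][4])):
--                         datacontinuous = False;
--             if datacontinuous:
--                 x.append(data[n - 1][1]);
--             else:
--                 if HISTORY == None:
--                     break;
--                 else:
--                     x.append(HISTORY[data[n][2]][data[n][3] - 1][data[n][4]]); ##
--             n -= 1;
--         if (len(x) == 3 + k):
--             X.append(x);
--     return X;
-- ===== SOURCE B (Python) =====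
-- def generate_features(data, k, HISTORY = None):
--     '''
--     Feature matrix via a run-length continuity table: streak[i] is how many
--     consecutive continuous steps end at row i; each sample row is then the
--     three ids, the available lags, and (when lags run short) HISTORY
--     fill-ins, or is dropped when there is no HISTORY to fill with.
--     '''
--     m = len(data)
--
--     def cont(n):
--         # is the step from row n-1 to row n continuous?
--         if n == 1:
--             return False
--         if (data[n][3] - data[n - 1][3]) % 48 != 1:
--             return False
--         if data[n][3] != 0 and (data[n][2] != data[n - 1][2] or data[n][4] != data[n - 1][4]):
--             return False
--         return True
--
--     streak = []
--     prev = 0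
--     for p in range(m):
--         prev = prev + 1 if cont(p) else 0
--         streak.append(prev)
--
--     X = []
--     for i in range(m):
--         t = min(k, streak[i])
--         row = [data[i][2], data[i][3], data[i][4]]
--         row += [data[i - 1 - j][1] for j in range(t)]
--         if t == k:
--             X.append(row)
--         elif HISTORY is not None:
--             for j in range(k - t):
--                 r = data[i - t - j]
--                 row.append(HISTORY[r[2]][r[3] - 1][r[4]])
--             X.append(row)
--     return X
-- ===== Notes on version B (the rewrite author's own statement) =====
-- stated objective: alternative
-- what changed: A re-walks backwards from every sample with a datacontinuous/break flag machine inside a per-sample loop; B computes one run-length continuity table over the rows in a single pass and then assembles each row directly from its truncated streak value (lags plus an optional HISTORY tail), with no per-step flag state; …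
-- intended difference: On HISTORY-less inputs whose rows are continuous around the wrap so that row 0's backward walk fills all k lags through negative indices, A keeps a row 0 whose lags are read from the END of the list (future samples), while B sees only one true predecessor and drops the sample, which is the intended reading of 'lagged features'. — e.g. on generate_features([[0, 10, 5, 0, 6], [0, 11, 5, 46, 6], [0, 12, 5, 47, 6]], 2, none): A returns [[5, 0, 6, 12, 11]], B returns []
-- outside the precondition, e.g. on generate_features([[1, 2, 3, 4, 5]], -1, None): A returns [], B returns [[3, 4, 5]]; on generate_features([[0, 9, 1, 0, 1], [0, 8, 1, 47, 1]], 3, None): A returns [], B returns []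
import Mathlib
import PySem

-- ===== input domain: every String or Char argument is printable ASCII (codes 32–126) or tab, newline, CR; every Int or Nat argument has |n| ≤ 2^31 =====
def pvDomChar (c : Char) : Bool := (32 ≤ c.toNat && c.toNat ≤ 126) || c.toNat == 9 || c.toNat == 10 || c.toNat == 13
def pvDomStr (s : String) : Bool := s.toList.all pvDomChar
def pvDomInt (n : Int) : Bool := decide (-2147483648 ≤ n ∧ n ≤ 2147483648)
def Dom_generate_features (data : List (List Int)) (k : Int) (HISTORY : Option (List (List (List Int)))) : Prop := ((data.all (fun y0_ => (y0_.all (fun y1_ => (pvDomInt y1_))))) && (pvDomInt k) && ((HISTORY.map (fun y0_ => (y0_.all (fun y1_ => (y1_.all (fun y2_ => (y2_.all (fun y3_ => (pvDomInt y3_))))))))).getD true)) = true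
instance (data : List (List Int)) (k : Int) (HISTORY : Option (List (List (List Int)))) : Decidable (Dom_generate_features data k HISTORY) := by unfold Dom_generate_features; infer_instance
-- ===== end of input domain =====

-- B replaces A's per-sample backward walk (flag machine with break) with one run-length
-- continuity table over the rows plus direct row assembly; outside the declared wraparound
-- region D_ the return values are proved equal on Pre_.

-- data[n][j] (Python wrap-around index; in range under Pre_)
def pvGV (data : List (List Int)) (n j : Int) : Int :=
  PySem.List.pyGetD (PySem.List.pyGetD data n []) j 0

-- HISTORY[data[n][2]][data[n][3]-1][data[n][4]]
def pvHV (HH : List (List (List Int))) (data : List (List Int)) (n : Int) : Int :=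
  PySem.List.pyGetD (PySem.List.pyGetD (PySem.List.pyGetD HH (pvGV data n 2) [])
    (pvGV data n 3 - 1) []) (pvGV data n 4) 0

-- ===== PORT A =====
-- A's inline elif-chain computing the new value of `datacontinuous` (same branch order)
def pvContA (data : List (List Int)) (n : Int) : Bool :=
  if n = 1 then false
  else if PySem.Int.mod (pvGV data n 3 - pvGV data (n - 1) 3) 48 ≠ 1 then false
  else if pvGV data n 3 ≠ 0 then
    (if pvGV data n 2 ≠ pvGV data (n - 1) 2 ∨ pvGV data n 4 ≠ pvGV data (n - 1) 4 then false else true)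
  else true

-- one iteration of A's inner `for j in range(k)` loop; state = (x, n, datacontinuous, broken)
def pvStepA (data : List (List Int)) (HISTORY : Option (List (List (List Int))))
    (s : List Int × Int × Bool × Bool) : List Int × Int × Bool × Bool :=
  match s with
  | (x, n, dc, broken) =>
    if broken then (x, n, dc, broken)
    else
      let dc' := if dc then pvContA data n else dc
      if dc' then (x ++ [pvGV data (n - 1) 1], n - 1, dc', broken)
      else
        match HISTORY with
        | none => (x, n, dc', true)          -- break
        | some HH => (x ++ [pvHV HH data n], n - 1, dc', broken)

def generate_features (data : List (List Int)) (k : Int) (HISTORY : Option (List (List (List Int)))) : List (List Int) :=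
  let datasize : Int := PySem.List.len data
  (PySem.List.pyRange 0 datasize 1).foldl (fun X i =>
    let x : List Int := [pvGV data i 2, pvGV data i 3, pvGV data i 4]
    let s := (PySem.List.pyRange 0 k 1).foldl (fun s _ => pvStepA data HISTORY s) (x, i, true, false)
    if PySem.List.len s.1 = 3 + k then X ++ [s.1] else X) []

-- ===== PORT B =====
-- Source B's cont(n): is the step from row n-1 to row n continuous?
def pvContB (data : List (List Int)) (n : Int) : Bool :=
  if n = 1 then false
  else if PySem.Int.mod (pvGV data n 3 - pvGV data (n - 1) 3) 48 ≠ 1 then false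
  else if pvGV data n 3 ≠ 0 ∧ (pvGV data n 2 ≠ pvGV data (n - 1) 2 ∨ pvGV data n 4 ≠ pvGV data (n - 1) 4) then false
  else true

def generate_features_alt (data : List (List Int)) (k : Int) (HISTORY : Option (List (List (List Int)))) : List (List Int) :=
  let m : Int := PySem.List.len data
  -- streak[p] = length of the maximal continuous run of rows ending at row p
  let streak := ((PySem.List.pyRange 0 m 1).foldl
      (fun (st : List Int × Int) p =>
        let prev := if pvContB data p then st.2 + 1 else 0
        (st.1 ++ [prev], prev)) ([], 0)).1
  (PySem.List.pyRange 0 m 1).foldl (fun X i =>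
    let t := min k (PySem.List.pyGetD streak i 0)
    let row := [pvGV data i 2, pvGV data i 3, pvGV data i 4]
      ++ (PySem.List.pyRange 0 t 1).map (fun j => pvGV data (i - 1 - j) 1)
    if t = k then X ++ [row]
    else
      match HISTORY with
      | none => X                           -- no HISTORY: drop the sample
      | some HH => X ++ [row ++ (PySem.List.pyRange 0 (k - t) 1).map (fun j => pvHV HH data (i - t - j))]) []

-- ===== PRECONDITION & SPEC =====
-- per-row HISTORY indices in range (Python wrap allowed), so A's HISTORY lookups never raise
def pvHistOK (data : List (List Int)) (HH : List (List (List Int))) : Bool :=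
  data.all fun r =>
    let a := PySem.List.pyGetD r 2 0
    let L := PySem.List.pyGetD HH a []
    let b := PySem.List.pyGetD r 3 0 - 1
    let L2 := PySem.List.pyGetD L b []
    decide (PySem.Raise.InRange HH.length a) && decide (PySem.Raise.InRange L.length b)
      && decide (PySem.Raise.InRange L2.length (PySem.List.pyGetD r 4 0))

-- row n of the input under Python's index convention, written on the raw list
-- (the doubled list realises the negative-index wrap; out of [-len, len) it is empty)
def pvRow (data : List (List Int)) (n : Int) : List Int :=
  if -(data.length : Int) ≤ n ∧ n < (data.length : Int) then
    (data ++ data).getD (n + (data.length : Int)).toNat []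
  else []

-- input-level continuity of the step from row n-1 to row n, stated as a positive
-- closed-form property of the raw rows (timeslot advances by one mod 48; ids agree
-- unless the timeslot is 0; position 1 never counts as continuous)
def pvContP (data : List (List Int)) (n : Int) : Prop :=
  n ≠ 1 ∧ ((pvRow data n).getD 3 0 - (pvRow data (n - 1)).getD 3 0) % 48 = 1 ∧
    ((pvRow data n).getD 3 0 = 0 ∨
      ((pvRow data n).getD 2 0 = (pvRow data (n - 1)).getD 2 0 ∧
       (pvRow data n).getD 4 0 = (pvRow data (n - 1)).getD 4 0))

-- Pre_ restricts to the natural domain 0 ≤ k and rows of width ≥ 5; it requires in-range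
-- HISTORY indices when HISTORY is given (else A raises IndexError), admits k > len(data)
-- only for HISTORY-less inputs whose first step is discontinuous (beyond that A's backward
-- walk can index data below -len(data) and raise IndexError), and when HISTORY is given it
-- excludes the wrap corner (row 0 continuous with the end of the list and k > 1), where A
-- fills row 0's lags from the END of the list and B fills them from HISTORY — two fills no
-- specification fixes; the HISTORY-less part of that corner stays inside the claim as D_.
def Pre_generate_features (data : List (List Int)) (k : Int) (HISTORY : Option (List (List (List Int)))) : Prop :=
  data = [] ∨
    (0 ≤ k ∧ (∀ r ∈ data, 5 ≤ r.length) ∧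
      (k ≤ (data.length : Int) ∨ (HISTORY = none ∧ ¬ pvContP data 0)) ∧
      (HISTORY = none ∨ (HISTORY.all (pvHistOK data) = true ∧ ¬(1 < k ∧ pvContP data 0 ∧ pvContP data (-1)))))
instance (data : List (List Int)) (k : Int) (HISTORY : Option (List (List (List Int)))) : Decidable (Pre_generate_features data k HISTORY) := by unfold Pre_generate_features pvContP; infer_instance

def pvWitness_generate_features : List (List Int) × Int × Option (List (List (List Int))) :=
  ([[0, 7, 2, 3, 4], [0, 9, 2, 4, 4]], 1, none)

-- On HISTORY-less inputs whose rows are continuous around the wrap so that row 0's backward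
-- walk fills all k lags through negative indices, A keeps a row 0 whose lags are read from
-- the END of the list (future samples), while B sees a single true predecessor and drops the
-- sample — the intended reading of 'lagged features'.
def D_generate_features (data : List (List Int)) (k : Int) (HISTORY : Option (List (List (List Int)))) : Prop :=
  0 < data.length ∧ 1 < k ∧ HISTORY = none ∧
    (∀ j ∈ List.range k.toNat, pvContP data (-(j : Int)))
instance (data : List (List Int)) (k : Int) (HISTORY : Option (List (List (List Int)))) : Decidable (D_generate_features data k HISTORY) := by unfold D_generate_features pvContP; infer_instance

def Spec_generate_features (data : List (List Int)) (k : Int) (HISTORY : Option (List (List (List Int)))) (out : List (List Int)) : Prop := ¬ D_generate_features data k HISTORY → out = generate_features_alt data k HISTORY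
instance (data : List (List Int)) (k : Int) (HISTORY : Option (List (List (List Int)))) (out : List (List Int)) : Decidable (Spec_generate_features data k HISTORY out) := by unfold Spec_generate_features; infer_instance

def pvDiffWitness_generate_features : List (List Int) × Int × Option (List (List (List Int))) :=
  ([[0, 10, 5, 0, 6], [0, 11, 5, 46, 6], [0, 12, 5, 47, 6]], 2, none)

def pvDiffWitnessOut_generate_features : (List (List Int)) × (List (List Int)) :=
  ([[5, 0, 6, 12, 11]], [])

-- ===== CLAIM (what is proved, stated in full; the proofs are below) =====
def Claim_unchanged_generate_features : Prop := ∀ (data : List (List Int)) (k : Int) (HISTORY : Option (List (List (List Int)))), Dom_generate_features data k HISTORY → Pre_generate_features data k HISTORY → Spec_generate_features data k HISTORY (generate_features data k HISTORY)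

def Claim_changed_generate_features : Prop := Dom_generate_features (pvDiffWitness_generate_features.1) (pvDiffWitness_generate_features.2.1) (pvDiffWitness_generate_features.2.2) ∧ Pre_generate_features (pvDiffWitness_generate_features.1) (pvDiffWitness_generate_features.2.1) (pvDiffWitness_generate_features.2.2) ∧ D_generate_features (pvDiffWitness_generate_features.1) (pvDiffWitness_generate_features.2.1) (pvDiffWitness_generate_features.2.2) ∧ generate_features (pvDiffWitness_generate_features.1) (pvDiffWitness_generate_features.2.1) (pvDiffWitness_generate_features.2.2) = pvDiffWitnessOut_generate_features.1 ∧ generate_features_alt (pvDiffWitness_generate_features.1) (pvDiffWitness_generate_features.2.1) (pvDiffWitness_generate_features.2.2) = pvDiffWitnessOut_generate_features.2 ∧ pvDiffWitnessOut_generate_features.1 ≠ pvDiffWitnessOut_generate_features.2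

def Claim_exact_generate_features : Prop := ∀ (data : List (List Int)) (k : Int) (HISTORY : Option (List (List (List Int)))), Dom_generate_features data k HISTORY → Pre_generate_features data k HISTORY → D_generate_features data k HISTORY → generate_features data k HISTORY ≠ generate_features_alt data k HISTORY

-- ===== LEMMAS AND PROOFS =====

-- the lag suffix data[n-1-j][1], j = 0..t-1
def pvLags (data : List (List Int)) (n : Int) (t : Nat) : List Int :=
  (List.range t).map (fun (j : Nat) => pvGV data (n - 1 - (j : Int)) 1)

-- the HISTORY suffix at positions n, n-1, …
def pvHvs (HH : List (List (List Int))) (data : List (List Int)) (n : Int) (t : Nat) : List Int :=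
  (List.range t).map (fun (j : Nat) => pvHV HH data (n - (j : Int)))

-- number of continuous steps A takes from position n with fuel c
def pvRunT (data : List (List Int)) : Nat → Int → Nat
  | 0, _ => 0
  | c + 1, n => if pvContB data n then pvRunT data c (n - 1) + 1 else 0

-- B's streak value at row p-1 (prev after p loop iterations)
def pvPrev (data : List (List Int)) : Nat → Nat
  | 0 => 0
  | p + 1 => if pvContB data (p : Int) then pvPrev data p + 1 else 0

theorem pvRow_eq (data : List (List Int)) (n : Int) :
    pvRow data n = PySem.List.pyGetD data n [] := by
  unfold pvRow
  by_cases h : -(data.length : Int) ≤ n ∧ n < (data.length : Int)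
  · rw [if_pos h]
    by_cases hn : 0 ≤ n
    · rw [show n = ((n.toNat : Nat) : Int) from by omega]
      rw [PySem.List.pyGetD_natCast]
      have ht : (((n.toNat : Nat) : Int) + (data.length : Int)).toNat
          = data.length + n.toNat := by omega
      rw [ht, List.getD_eq_getElem?_getD, List.getD_eq_getElem?_getD,
        List.getElem?_append_right (by omega)]
      have h2 : data.length + n.toNat - data.length = n.toNat := by omega
      rw [h2]
    · have hn' : n < 0 := by omega
      rw [show n = -((((-n).toNat : Nat)) : Int) from by omega]
      rw [PySem.List.pyGetD_neg_natCast _ _ _ (by omega) (by omega)]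
      have ht : (-((((-n).toNat : Nat)) : Int) + (data.length : Int)).toNat
          = data.length - (-n).toNat := by omega
      rw [ht, List.getD_eq_getElem?_getD, List.getElem?_append_left (by omega)]
      rw [List.getElem?_eq_getElem (by omega : data.length - (-n).toNat < data.length)]
      rfl
  · rw [if_neg h]
    rw [PySem.List.pyGetD_of_none]
    rw [PySem.List.pyGet?_eq_none_iff]
    simp only [PySem.Raise.InRange]
    omega

theorem pvGV_row (data : List (List Int)) (n : Int) (j : Nat) (hj : ((j : Nat) : Int) = (j : Int)) :
    pvGV data n (j : Int) = (pvRow data n).getD j 0 := by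
  unfold pvGV
  rw [pvRow_eq, ← hj, PySem.List.pyGetD_natCast]

theorem pvContP_iff (data : List (List Int)) (n : Int) : pvContP data n ↔ pvContB data n = true := by
  have h2 : pvGV data n 2 = (pvRow data n).getD 2 0 := by
    have := pvGV_row data n 2 rfl; simpa using this
  have h3 : pvGV data n 3 = (pvRow data n).getD 3 0 := by
    have := pvGV_row data n 3 rfl; simpa using this
  have h4 : pvGV data n 4 = (pvRow data n).getD 4 0 := by
    have := pvGV_row data n 4 rfl; simpa using this
  have h2' : pvGV data (n - 1) 2 = (pvRow data (n - 1)).getD 2 0 := by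
    have := pvGV_row data (n - 1) 2 rfl; simpa using this
  have h3' : pvGV data (n - 1) 3 = (pvRow data (n - 1)).getD 3 0 := by
    have := pvGV_row data (n - 1) 3 rfl; simpa using this
  have h4' : pvGV data (n - 1) 4 = (pvRow data (n - 1)).getD 4 0 := by
    have := pvGV_row data (n - 1) 4 rfl; simpa using this
  unfold pvContP pvContB
  rw [PySem.Int.mod_eq_emod_of_pos (by norm_num)] at *
  rw [← h2, ← h3, ← h4, ← h2', ← h3', ← h4']
  split_ifs with g1 g2 g3 <;> simp_all <;> tauto

theorem pvContA_eq (data : List (List Int)) (n : Int) : pvContA data n = pvContB data n := by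
  unfold pvContA pvContB
  split_ifs <;> tauto

theorem pvLags_zero (data : List (List Int)) (n : Int) : pvLags data n 0 = [] := rfl

theorem pvLags_succ (data : List (List Int)) (n : Int) (t : Nat) :
    pvLags data n (t + 1) = pvGV data (n - 1) 1 :: pvLags data (n - 1) t := by
  unfold pvLags
  rw [List.range_succ_eq_map, List.map_cons, List.map_map]
  congr 1
  · norm_num
  · apply List.map_congr_left
    intro j _
    simp only [Function.comp_apply]
    congr 1
    push_cast [Nat.succ_eq_add_one]
    ring

theorem pvHvs_succ (HH : List (List (List Int))) (data : List (List Int)) (n : Int) (t : Nat) :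
    pvHvs HH data n (t + 1) = pvHV HH data n :: pvHvs HH data (n - 1) t := by
  unfold pvHvs
  rw [List.range_succ_eq_map, List.map_cons, List.map_map]
  congr 1
  · norm_num
  · apply List.map_congr_left
    intro j _
    simp only [Function.comp_apply]
    congr 1
    push_cast [Nat.succ_eq_add_one]
    ring

theorem pvLags_length (data : List (List Int)) (n : Int) (t : Nat) :
    (pvLags data n t).length = t := by simp [pvLags]

theorem pvHvs_length (HH : List (List (List Int))) (data : List (List Int)) (n : Int) (t : Nat) :
    (pvHvs HH data n t).length = t := by simp [pvHvs]

theorem pvRunT_succ (data : List (List Int)) (c : Nat) (n : Int) :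
    pvRunT data (c + 1) n = if pvContB data n then pvRunT data c (n - 1) + 1 else 0 := rfl

theorem pvPrev_succ (data : List (List Int)) (p : Nat) :
    pvPrev data (p + 1) = if pvContB data (p : Int) then pvPrev data p + 1 else 0 := rfl

theorem pvRunT_le (data : List (List Int)) (c : Nat) (n : Int) : pvRunT data c n ≤ c := by
  induction c generalizing n with
  | zero => simp [pvRunT]
  | succ c ih =>
    unfold pvRunT
    split
    · exact Nat.succ_le_succ (ih _)
    · exact Nat.zero_le _

theorem pvPrev_le (data : List (List Int)) (p : Nat) : pvPrev data p ≤ p := by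
  induction p with
  | zero => simp [pvPrev]
  | succ p ih =>
    unfold pvPrev
    split
    · exact Nat.succ_le_succ ih
    · exact Nat.zero_le _

theorem pvRunT_neg1 (data : List (List Int)) (h : pvContB data (-1) = false) (c : Nat) :
    pvRunT data c (-1) = 0 := by
  cases c with
  | zero => rfl
  | succ c => simp [pvRunT, h]

-- pvRunT equals the k-truncated streak value, unless the run wraps past row 0 with budget left
theorem pvRunT_min (data : List (List Int)) (i : Nat) : ∀ (c : Nat),
    ¬(pvPrev data (i + 1) = i + 1 ∧ pvContB data (-1) = true ∧ i + 1 < c) →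
    pvRunT data c (i : Int) = min c (pvPrev data (i + 1)) := by
  induction i with
  | zero =>
    intro c h
    cases c with
    | zero => simp [pvRunT]
    | succ c =>
      rw [pvRunT_succ, pvPrev_succ]
      by_cases h0 : pvContB data ((0 : Nat) : Int) = true
      · rw [if_pos h0, if_pos h0]
        by_cases hm1 : pvContB data (-1) = true
        · have hc : c = 0 := by
            by_contra hc
            exact h ⟨by rw [pvPrev_succ, if_pos h0]; rfl, hm1, by omega⟩
          subst hc
          rw [show ((0 : Nat) : Int) - 1 = -1 by norm_num]
          have : pvRunT data 0 (-1) = 0 := rfl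
          have hp0 : pvPrev data 0 = 0 := rfl
          omega
        · rw [show ((0 : Nat) : Int) - 1 = -1 by norm_num,
            pvRunT_neg1 data (by simpa using hm1)]
          have hp0 : pvPrev data 0 = 0 := rfl
          omega
      · rw [if_neg h0, if_neg h0]
        simp
  | succ i ih =>
    intro c h
    cases c with
    | zero => simp [pvRunT]
    | succ c =>
      rw [pvRunT_succ, pvPrev_succ]
      by_cases hi : pvContB data ((i + 1 : Nat) : Int) = true
      · rw [if_pos hi, if_pos hi,
          show ((i + 1 : Nat) : Int) - 1 = (i : Int) by push_cast; ring,
          ih c ?_]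
        · have := pvPrev_le data (i + 1)
          omega
        · intro ⟨h1, h2, h3⟩
          exact h ⟨by rw [pvPrev_succ, if_pos hi, h1], h2, by omega⟩
      · rw [if_neg hi, if_neg hi]
        simp

-- a full-fuel run means every step in the window was continuous
theorem pvRunT_full (data : List (List Int)) (c : Nat) : ∀ (n : Int), pvRunT data c n = c →
    ∀ j ∈ List.range c, pvContB data (n - (j : Int)) = true := by
  induction c with
  | zero => intro n _ j hj; simp at hj
  | succ c ih =>
    intro n hrun j hj
    rw [pvRunT_succ] at hrun
    by_cases hc : pvContB data n = true
    · rw [if_pos hc] at hrun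
      rw [List.mem_range] at hj
      cases j with
      | zero => simpa using hc
      | succ j =>
        have := ih (n - 1) (by omega) j (by rw [List.mem_range]; omega)
        rw [show n - 1 - (j : Int) = n - ((j + 1 : Nat) : Int) by push_cast; ring] at this
        exact this
    · rw [if_neg hc] at hrun; omega

-- a full streak means every step up to that row was continuous
theorem pvPrev_full (data : List (List Int)) (p : Nat) :
    pvPrev data p = p ↔ ∀ j ∈ List.range p, pvContB data (j : Int) = true := by
  induction p with
  | zero => simp [pvPrev]
  | succ p ih =>
    rw [pvPrev_succ]
    by_cases hc : pvContB data (p : Int) = true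
    · rw [if_pos hc]
      constructor
      · intro h j hj
        rw [List.mem_range] at hj
        rcases Nat.lt_succ_iff_lt_or_eq.mp hj with hj | hj
        · exact ih.mp (by omega) j (List.mem_range.mpr hj)
        · subst hj; exact hc
      · intro h
        have : pvPrev data p = p := ih.mpr (fun j hj => h j (by rw [List.mem_range] at *; omega))
        omega
    · rw [if_neg hc]
      constructor
      · omega
      · intro h; exact absurd (h p (List.mem_range.mpr (by omega))) (by simpa using hc)

-- iterating pvStepA on a broken state is the identity
theorem pvStepA_broken (data : List (List Int)) (H : Option (List (List (List Int))))
    (c : Nat) (x : List Int) (n : Int) (dc : Bool) :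
    (pvStepA data H)^[c] (x, n, dc, true) = (x, n, dc, true) := by
  induction c with
  | zero => rfl
  | succ c ih => rw [Function.iterate_succ_apply, pvStepA]; simpa using ih

-- one application of pvStepA on a live, still-continuous state
theorem pvStepA_app_true (data : List (List Int)) (H : Option (List (List (List Int))))
    (x : List Int) (n : Int) :
    pvStepA data H (x, n, true, false) =
      if pvContB data n then (x ++ [pvGV data (n - 1) 1], n - 1, true, false)
      else match H with
        | none => (x, n, false, true)
        | some HH => (x ++ [pvHV HH data n], n - 1, false, false) := by
  unfold pvStepA
  simp only [if_neg (by simp : ¬ (false = true)), pvContA_eq]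
  by_cases h : pvContB data n <;> simp [h]

-- once discontinuous with HISTORY present, every step appends a HISTORY value
theorem pvStepA_false (data : List (List Int)) (HH : List (List (List Int)))
    (c : Nat) : ∀ (x : List Int) (n : Int),
    (pvStepA data (some HH))^[c] (x, n, false, false) = (x ++ pvHvs HH data n c, n - (c : Int), false, false) := by
  induction c with
  | zero => intro x n; simp [pvHvs]
  | succ c ih =>
    intro x n
    rw [Function.iterate_succ_apply]
    show (pvStepA data (some HH))^[c] (x ++ [pvHV HH data n], n - 1, false, false) = _
    rw [ih, pvHvs_succ]
    have h1 : x ++ [pvHV HH data n] ++ pvHvs HH data (n - 1) c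
        = x ++ pvHV HH data n :: pvHvs HH data (n - 1) c := by simp
    have h2 : n - 1 - (c : Int) = n - ((c + 1 : Nat) : Int) := by push_cast; ring
    rw [h1, h2]

theorem pvStepA_true_none (data : List (List Int)) (c : Nat) : ∀ (x : List Int) (n : Int),
    (pvStepA data none)^[c] (x, n, true, false) =
      if pvRunT data c n = c then (x ++ pvLags data n c, n - (c : Int), true, false)
      else (x ++ pvLags data n (pvRunT data c n), n - (pvRunT data c n : Int), false, true) := by
  induction c with
  | zero => intro x n; simp [pvRunT, pvLags]
  | succ c ih =>
    intro x n
    rw [Function.iterate_succ_apply, pvStepA_app_true]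
    by_cases h : pvContB data n = true
    · rw [if_pos h, ih]
      have hrun : pvRunT data (c + 1) n = pvRunT data c (n - 1) + 1 := by
        rw [pvRunT_succ, if_pos h]
      by_cases h2 : pvRunT data c (n - 1) = c
      · rw [if_pos h2, if_pos (by rw [hrun, h2])]
        have h1 : x ++ [pvGV data (n - 1) 1] ++ pvLags data (n - 1) c = x ++ pvLags data n (c + 1) := by
          rw [pvLags_succ]; simp
        have h3 : n - 1 - (c : Int) = n - ((c + 1 : Nat) : Int) := by push_cast; ring
        rw [h1, h3]
      · rw [if_neg h2, if_neg (by rw [hrun]; omega), hrun]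
        have h1 : x ++ [pvGV data (n - 1) 1] ++ pvLags data (n - 1) (pvRunT data c (n - 1))
            = x ++ pvLags data n (pvRunT data c (n - 1) + 1) := by
          rw [pvLags_succ]; simp
        have h3 : n - 1 - (pvRunT data c (n - 1) : Int)
            = n - ((pvRunT data c (n - 1) + 1 : Nat) : Int) := by push_cast; ring
        rw [h1, h3]
    · rw [if_neg h]
      have hrun : pvRunT data (c + 1) n = 0 := by
        rw [pvRunT_succ, if_neg h]
      rw [pvStepA_broken, if_neg (by omega), hrun]
      simp [pvLags]

theorem pvStepA_true_some (data : List (List Int)) (HH : List (List (List Int))) (c : Nat) :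
    ∀ (x : List Int) (n : Int),
    (pvStepA data (some HH))^[c] (x, n, true, false) =
      if pvRunT data c n = c then (x ++ pvLags data n c, n - (c : Int), true, false)
      else (x ++ pvLags data n (pvRunT data c n) ++ pvHvs HH data (n - (pvRunT data c n : Int)) (c - pvRunT data c n),
            n - (c : Int), false, false) := by
  induction c with
  | zero => intro x n; simp [pvRunT, pvLags]
  | succ c ih =>
    intro x n
    rw [Function.iterate_succ_apply, pvStepA_app_true]
    by_cases h : pvContB data n = true
    · rw [if_pos h, ih]
      have hrun : pvRunT data (c + 1) n = pvRunT data c (n - 1) + 1 := by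
        rw [pvRunT_succ, if_pos h]
      by_cases h2 : pvRunT data c (n - 1) = c
      · rw [if_pos h2, if_pos (by rw [hrun, h2])]
        have h1 : x ++ [pvGV data (n - 1) 1] ++ pvLags data (n - 1) c = x ++ pvLags data n (c + 1) := by
          rw [pvLags_succ]; simp
        have h3 : n - 1 - (c : Int) = n - ((c + 1 : Nat) : Int) := by push_cast; ring
        rw [h1, h3]
      · rw [if_neg h2, if_neg (by rw [hrun]; omega), hrun]
        set r := pvRunT data c (n - 1) with hr
        have h1 : x ++ [pvGV data (n - 1) 1] ++ pvLags data (n - 1) r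
            ++ pvHvs HH data (n - 1 - (r : Int)) (c - r)
            = x ++ pvLags data n (r + 1) ++ pvHvs HH data (n - ((r + 1 : Nat) : Int)) (c + 1 - (r + 1)) := by
          rw [pvLags_succ]
          have harg : n - 1 - (r : Int) = n - ((r + 1 : Nat) : Int) := by push_cast; ring
          have hsub : c - r = c + 1 - (r + 1) := by omega
          rw [← harg, ← hsub]
          simp
        have h3 : n - 1 - (c : Int) = n - ((c + 1 : Nat) : Int) := by push_cast; ring
        rw [h1, h3]
    · rw [if_neg h]
      have hrun : pvRunT data (c + 1) n = 0 := by
        rw [pvRunT_succ, if_neg h]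
      rw [pvStepA_false, if_neg (by omega), hrun]
      have h1 : x ++ [pvHV HH data n] ++ pvHvs HH data (n - 1) c
          = x ++ pvLags data n 0 ++ pvHvs HH data (n - ((0 : Nat) : Int)) (c + 1 - 0) := by
        rw [pvLags_zero]
        have : n - ((0 : Nat) : Int) = n := by push_cast; ring
        rw [this]
        have : c + 1 - 0 = c + 1 := by omega
        rw [this, pvHvs_succ]
        simp
      have h3 : n - 1 - (c : Int) = n - ((c + 1 : Nat) : Int) := by push_cast; ring
      rw [h1, h3]

-- B's streak table is the map of pvPrev
theorem pvTable (data : List (List Int)) (q : Nat) :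
    (List.range q).foldl
      (fun (st : List Int × Int) (p : Nat) =>
        let prev := if pvContB data (p : Int) then st.2 + 1 else 0
        (st.1 ++ [prev], prev)) ([], 0)
    = ((List.range q).map (fun p => (pvPrev data (p + 1) : Int)), (pvPrev data q : Int)) := by
  induction q with
  | zero => simp [pvPrev]
  | succ q ih =>
    rw [List.range_succ, List.foldl_append, ih]
    simp only [List.foldl_cons, List.foldl_nil, List.map_append, List.map_cons, List.map_nil]
    have hprev : (if pvContB data ((q : Nat) : Int) then (pvPrev data q : Int) + 1 else 0)
        = (pvPrev data (q + 1) : Int) := by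
      show _ = ((if pvContB data ((q : Nat) : Int) then pvPrev data q + 1 else 0 : Nat) : Int)
      by_cases h : pvContB data ((q : Nat) : Int) = true <;> simp [h]
    simp only [Prod.mk.injEq]
    exact ⟨by rw [hprev], by rw [hprev]⟩

-- proof-only copies of the two loop bodies (defeq to the port bodies)
def pvTbl (data : List (List Int)) : List Int :=
  ((PySem.List.pyRange 0 (PySem.List.len data) 1).foldl
    (fun (st : List Int × Int) p =>
      let prev := if pvContB data p then st.2 + 1 else 0
      (st.1 ++ [prev], prev)) ([], 0)).1

def pvBodyA (data : List (List Int)) (k : Int) (HISTORY : Option (List (List (List Int))))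
    (X : List (List Int)) (i : Int) : List (List Int) :=
  if PySem.List.len ((PySem.List.pyRange 0 k 1).foldl (fun s _ => pvStepA data HISTORY s)
      ([pvGV data i 2, pvGV data i 3, pvGV data i 4], i, true, false)).1 = 3 + k
  then X ++ [((PySem.List.pyRange 0 k 1).foldl (fun s _ => pvStepA data HISTORY s)
      ([pvGV data i 2, pvGV data i 3, pvGV data i 4], i, true, false)).1]
  else X

def pvBodyB (data : List (List Int)) (k : Int) (HISTORY : Option (List (List (List Int))))
    (X : List (List Int)) (i : Int) : List (List Int) :=
  if min k (PySem.List.pyGetD (pvTbl data) i 0) = k then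
    X ++ [[pvGV data i 2, pvGV data i 3, pvGV data i 4]
      ++ (PySem.List.pyRange 0 (min k (PySem.List.pyGetD (pvTbl data) i 0)) 1).map (fun j => pvGV data (i - 1 - j) 1)]
  else
    match HISTORY with
    | none => X
    | some HH => X ++ [([pvGV data i 2, pvGV data i 3, pvGV data i 4]
        ++ (PySem.List.pyRange 0 (min k (PySem.List.pyGetD (pvTbl data) i 0)) 1).map (fun j => pvGV data (i - 1 - j) 1))
      ++ (PySem.List.pyRange 0 (k - min k (PySem.List.pyGetD (pvTbl data) i 0)) 1).map
          (fun j => pvHV HH data (i - min k (PySem.List.pyGetD (pvTbl data) i 0) - j))]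

theorem pvTbl_eq (data : List (List Int)) :
    pvTbl data = (List.range data.length).map (fun q => (pvPrev data (q + 1) : Int)) := by
  unfold pvTbl
  rw [PySem.List.len_eq, PySem.List.pyRange_zero_natCast, List.foldl_map]
  exact congrArg Prod.fst (pvTable data data.length)

theorem pvRowEqCore (data : List (List Int)) (k : Int) (HISTORY : Option (List (List (List Int))))
    (hk0 : 0 ≤ k) (pN : Nat) (hpm : pN < data.length)
    (hside : ¬(pvPrev data (pN + 1) = pN + 1 ∧ pvContB data (-1) = true ∧ pN + 1 < k.toNat))
    (acc : List (List Int)) :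
    pvBodyA data k HISTORY acc (pN : Int) = pvBodyB data k HISTORY acc (pN : Int) := by
  have hck : (k.toNat : Int) = k := Int.toNat_of_nonneg hk0
  unfold pvBodyA pvBodyB
  rw [List.foldl_const, PySem.List.length_pyRange_one]
  have hkc : (k - 0).toNat = k.toNat := by omega
  rw [hkc]
  have hlook : PySem.List.pyGetD (pvTbl data) (pN : Int) 0 = (pvPrev data (pN + 1) : Int) := by
    rw [pvTbl_eq data, PySem.List.pyGetD_natCast, PySem.List.getD_map_range _ _ _ _ (by omega)]
  rw [hlook]
  -- no wrap chain within the fuel window: the run equals the truncated streak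
  have hrun : pvRunT data k.toNat (pN : Int) = min k.toNat (pvPrev data (pN + 1)) :=
    pvRunT_min data pN k.toNat hside
  have htle : pvRunT data k.toNat (pN : Int) ≤ k.toNat := pvRunT_le data k.toNat (pN : Int)
  have htmin : min k ((pvPrev data (pN + 1) : Nat) : Int)
      = ((pvRunT data k.toNat (pN : Int) : Nat) : Int) := by
    rw [hrun, Nat.cast_min, hck]
  rw [htmin]
  have hlag : (PySem.List.pyRange 0 ((pvRunT data k.toNat (pN : Int) : Nat) : Int) 1).map
        (fun j => pvGV data ((pN : Int) - 1 - j) 1)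
      = pvLags data (pN : Int) (pvRunT data k.toNat (pN : Int)) := by
    rw [PySem.List.pyRange_zero_natCast, List.map_map]
    rfl
  rw [hlag]
  rcases HISTORY with _ | HH
  · -- HISTORY = None
    rw [pvStepA_true_none data k.toNat]
    by_cases ht : pvRunT data k.toNat (pN : Int) = k.toNat
    · rw [if_pos ht]
      have hlen : PySem.List.len (([pvGV data (pN : Int) 2, pvGV data (pN : Int) 3, pvGV data (pN : Int) 4]
          ++ pvLags data (pN : Int) k.toNat, (pN : Int) - (k.toNat : Int), true, false)
          : List Int × Int × Bool × Bool).1 = 3 + k := by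
        simp [PySem.List.len_eq, pvLags_length]
        omega
      rw [if_pos hlen, if_pos (by omega : ((pvRunT data k.toNat (pN : Int) : Nat) : Int) = k), ht]
    · rw [if_neg ht]
      have hlen : ¬ PySem.List.len (([pvGV data (pN : Int) 2, pvGV data (pN : Int) 3, pvGV data (pN : Int) 4]
          ++ pvLags data (pN : Int) (pvRunT data k.toNat (pN : Int)),
          (pN : Int) - (pvRunT data k.toNat (pN : Int) : Int), false, true)
          : List Int × Int × Bool × Bool).1 = 3 + k := by
        simp [PySem.List.len_eq, pvLags_length]
        omega
      rw [if_neg hlen, if_neg (by omega : ¬ ((pvRunT data k.toNat (pN : Int) : Nat) : Int) = k)]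
  · -- HISTORY = some HH
    have hkt : k - ((pvRunT data k.toNat (pN : Int) : Nat) : Int)
        = ((k.toNat - pvRunT data k.toNat (pN : Int) : Nat) : Int) := by omega
    have hhv : (PySem.List.pyRange 0 (k - ((pvRunT data k.toNat (pN : Int) : Nat) : Int)) 1).map
          (fun j => pvHV HH data ((pN : Int) - ((pvRunT data k.toNat (pN : Int) : Nat) : Int) - j))
        = pvHvs HH data ((pN : Int) - ((pvRunT data k.toNat (pN : Int) : Nat) : Int))
            (k.toNat - pvRunT data k.toNat (pN : Int)) := by
      rw [hkt, PySem.List.pyRange_zero_natCast, List.map_map]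
      rfl
    rw [pvStepA_true_some data HH k.toNat]
    by_cases ht : pvRunT data k.toNat (pN : Int) = k.toNat
    · rw [if_pos ht]
      have hlen : PySem.List.len (([pvGV data (pN : Int) 2, pvGV data (pN : Int) 3, pvGV data (pN : Int) 4]
          ++ pvLags data (pN : Int) k.toNat, (pN : Int) - (k.toNat : Int), true, false)
          : List Int × Int × Bool × Bool).1 = 3 + k := by
        simp [PySem.List.len_eq, pvLags_length]
        omega
      rw [if_pos hlen, if_pos (by omega : ((pvRunT data k.toNat (pN : Int) : Nat) : Int) = k), ht]
    · rw [if_neg ht]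
      have hlen : PySem.List.len (([pvGV data (pN : Int) 2, pvGV data (pN : Int) 3, pvGV data (pN : Int) 4]
          ++ pvLags data (pN : Int) (pvRunT data k.toNat (pN : Int))
          ++ pvHvs HH data ((pN : Int) - (pvRunT data k.toNat (pN : Int) : Int))
              (k.toNat - pvRunT data k.toNat (pN : Int)),
          (pN : Int) - (k.toNat : Int), false, false)
          : List Int × Int × Bool × Bool).1 = 3 + k := by
        simp [PySem.List.len_eq, pvLags_length, pvHvs_length]
        omega
      rw [if_pos hlen, if_neg (by omega : ¬ ((pvRunT data k.toNat (pN : Int) : Nat) : Int) = k)]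
      simp [hhv]

theorem pvRowEq (data : List (List Int)) (k : Int) (HISTORY : Option (List (List (List Int))))
    (hk0 : 0 ≤ k)
    (hPH : HISTORY = none ∨ ¬(1 < k ∧ pvContP data 0 ∧ pvContP data (-1)))
    (hnd : ¬ D_generate_features data k HISTORY) (i : Int) (hi0 : 0 ≤ i)
    (him : i < (data.length : Int)) (acc : List (List Int)) :
    pvBodyA data k HISTORY acc i = pvBodyB data k HISTORY acc i := by
  obtain ⟨pN, rfl⟩ : ∃ pN : Nat, i = (pN : Int) := ⟨i.toNat, (Int.toNat_of_nonneg hi0).symm⟩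
  have hpm : pN < data.length := by exact_mod_cast him
  have hck : (k.toNat : Int) = k := Int.toNat_of_nonneg hk0
  by_cases hside : pvPrev data (pN + 1) = pN + 1 ∧ pvContB data (-1) = true ∧ pN + 1 < k.toNat
  · unfold pvBodyA pvBodyB
    rw [List.foldl_const, PySem.List.length_pyRange_one]
    have hkc : (k - 0).toNat = k.toNat := by omega
    rw [hkc]
    have hlook : PySem.List.pyGetD (pvTbl data) (pN : Int) 0 = (pvPrev data (pN + 1) : Int) := by
      rw [pvTbl_eq data, PySem.List.pyGetD_natCast, PySem.List.getD_map_range _ _ _ _ (by omega)]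
    rw [hlook]
    obtain ⟨hfull, hm1, hlt⟩ := hside
    have hall := (pvPrev_full data (pN + 1)).mp hfull
    have hpN0 : pN = 0 := by
      by_contra hne
      have h1 := hall 1 (List.mem_range.mpr (by omega))
      simp [pvContB] at h1
    subst hpN0
    have hm0 : 0 < data.length := hpm
    have h1k : 1 < k := by omega
    have hc0 : pvContP data 0 := (pvContP_iff data 0).mpr (by simpa using hall 0 (List.mem_range.mpr (by omega)))
    have hcm1 : pvContP data (-1) := (pvContP_iff data (-1)).mpr hm1
    rcases HISTORY with _ | HH
    · -- HISTORY = none: by hnd the chain does not fill a full window, so A drops the row too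
      have hnf : ¬ ∀ j ∈ List.range k.toNat, pvContP data (-(j : Int)) := by
        intro hf
        exact hnd ⟨hm0, h1k, rfl, hf⟩
      have hrl : pvRunT data k.toNat ((0 : Nat) : Int) ≠ k.toNat := by
        intro h
        apply hnf
        intro j hj
        have := pvRunT_full data k.toNat ((0 : Nat) : Int) h j hj
        exact (pvContP_iff data (-(j : Int))).mpr (by simpa using this)
      rw [pvStepA_true_none data k.toNat, if_neg hrl]
      have hrle : pvRunT data k.toNat (0 : Int) ≤ k.toNat := by
        simpa using pvRunT_le data k.toNat ((0 : Nat) : Int)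
      have hrl' : pvRunT data k.toNat (0 : Int) ≠ k.toNat := by simpa using hrl
      have hlen : ¬ PySem.List.len (([pvGV data ((0 : Nat) : Int) 2, pvGV data ((0 : Nat) : Int) 3, pvGV data ((0 : Nat) : Int) 4]
          ++ pvLags data ((0 : Nat) : Int) (pvRunT data k.toNat ((0 : Nat) : Int)),
          ((0 : Nat) : Int) - (pvRunT data k.toNat ((0 : Nat) : Int) : Int), false, true)
          : List Int × Int × Bool × Bool).1 = 3 + k := by
        simp [PySem.List.len_eq, pvLags_length]
        omega
      rw [if_neg hlen]
      have htne : ¬ min k ((pvPrev data (0 + 1) : Nat) : Int) = k := by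
        have : ((pvPrev data (0 + 1) : Nat) : Int) < k := by omega
        omega
      rw [if_neg htne]
    · -- HISTORY = some: excluded by the Pre_ wrap-corner clause hPH
      rcases hPH with h | h
      · cases h
      · exact absurd ⟨h1k, hc0, hcm1⟩ h
  · exact pvRowEqCore data k HISTORY hk0 pN hpm hside acc


-- a fully continuous window gives a full-fuel run
theorem pvRunT_full' (data : List (List Int)) (c : Nat) : ∀ (n : Int),
    (∀ j ∈ List.range c, pvContB data (n - (j : Int)) = true) → pvRunT data c n = c := by
  induction c with
  | zero => intro n _; rfl
  | succ c ih =>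
    intro n h
    have h0 : pvContB data n = true := by simpa using h 0 (List.mem_range.mpr (by omega))
    rw [pvRunT_succ, if_pos h0, ih (n - 1) (fun j hj => by
      have := h (j + 1) (by rw [List.mem_range] at *; omega)
      rw [show n - ((j + 1 : Nat) : Int) = n - 1 - (j : Int) by push_cast; ring] at this
      exact this)]

-- both loop bodies only ever append to the accumulator
theorem pvBodyA_shape (data : List (List Int)) (k : Int) (HISTORY : Option (List (List (List Int))))
    (acc : List (List Int)) (i : Int) :
    pvBodyA data k HISTORY acc i = acc ++ pvBodyA data k HISTORY [] i := by
  unfold pvBodyA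
  split_ifs <;> simp

theorem pvBodyB_shape (data : List (List Int)) (k : Int) (HISTORY : Option (List (List (List Int))))
    (acc : List (List Int)) (i : Int) :
    pvBodyB data k HISTORY acc i = acc ++ pvBodyB data k HISTORY [] i := by
  unfold pvBodyB
  rcases HISTORY with _ | HH <;> split_ifs <;> simp

theorem pvFoldlShape (f : List (List Int) → Int → List (List Int))
    (hf : ∀ acc i, f acc i = acc ++ f [] i) :
    ∀ (l : List Int) (acc : List (List Int)), l.foldl f acc = acc ++ l.foldl f [] := by
  intro l
  induction l with
  | nil => intro acc; simp
  | cons x xs ih =>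
    intro acc
    rw [List.foldl_cons, List.foldl_cons, ih (f acc x), ih (f [] x), hf acc x]
    simp

-- ===== VERDICT (by name: the statement is the Claim_ definition above) =====
theorem generate_features_spec : Claim_unchanged_generate_features := by
  intro data k HISTORY _ hpre
  unfold Spec_generate_features
  intro hnd
  unfold Pre_generate_features at hpre
  by_cases hnil : data = []
  · subst hnil
    rfl
  · obtain ⟨hk0, -, -, h4⟩ := hpre.resolve_left hnil
    have hPH : HISTORY = none ∨ ¬(1 < k ∧ pvContP data 0 ∧ pvContP data (-1)) :=
      h4.imp id (fun h => h.2)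
    show generate_features data k HISTORY = generate_features_alt data k HISTORY
    unfold generate_features generate_features_alt
    apply PySem.List.foldl_congr_mem
    intro acc x hx
    rw [PySem.List.len_eq, PySem.List.mem_pyRange_one] at hx
    exact pvRowEq data k HISTORY hk0 hPH hnd x hx.1 hx.2 acc

theorem generate_features_changed : Claim_changed_generate_features := by
  unfold Claim_changed_generate_features; decide

theorem generate_features_tight : Claim_exact_generate_features := by
  intro data k HISTORY _ hpre hd
  obtain ⟨hm0, h1k, hnone, hwin⟩ := hd
  subst hnone
  have hnil : data ≠ [] := by intro h; subst h; simp at hm0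
  unfold Pre_generate_features at hpre
  obtain ⟨hk0, -, -, -⟩ := hpre.resolve_left hnil
  have hck : (k.toNat : Int) = k := Int.toNat_of_nonneg hk0
  have hwinB : ∀ j ∈ List.range k.toNat, pvContB data ((0 : Int) - (j : Int)) = true := by
    intro j hj
    have := (pvContP_iff data (-(j : Int))).mp (hwin j hj)
    simpa [zero_sub] using this
  have hc0B : pvContB data ((0 : Nat) : Int) = true := by
    simpa using hwinB 0 (List.mem_range.mpr (by omega))
  have hrfull : pvRunT data k.toNat (0 : Int) = k.toNat := pvRunT_full' data k.toNat 0 hwinB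
  have hprev1 : pvPrev data 1 = 1 := by rw [pvPrev_succ, if_pos hc0B]; rfl
  -- the two bodies at row 0
  have hA0 : pvBodyA data k none []
      (0 : Int) = [[pvGV data (0 : Int) 2, pvGV data (0 : Int) 3, pvGV data (0 : Int) 4]
        ++ pvLags data (0 : Int) k.toNat] := by
    unfold pvBodyA
    rw [List.foldl_const, PySem.List.length_pyRange_one]
    have hkc : (k - 0).toNat = k.toNat := by omega
    rw [hkc, pvStepA_true_none data k.toNat, if_pos hrfull]
    have hlen : PySem.List.len (([pvGV data (0 : Int) 2, pvGV data (0 : Int) 3, pvGV data (0 : Int) 4]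
        ++ pvLags data (0 : Int) k.toNat, (0 : Int) - (k.toNat : Int), true, false)
        : List Int × Int × Bool × Bool).1 = 3 + k := by
      simp [PySem.List.len_eq, pvLags_length]
      omega
    rw [if_pos hlen]
    simp
  have hlook0 : PySem.List.pyGetD (pvTbl data) (0 : Int) 0 = (1 : Int) := by
    rw [show (0 : Int) = ((0 : Nat) : Int) from by norm_num, pvTbl_eq data,
      PySem.List.pyGetD_natCast, PySem.List.getD_map_range _ _ _ _ (by omega)]
    simp [hprev1]
  have hB0 : pvBodyB data k none [] (0 : Int) = [] := by
    unfold pvBodyB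
    rw [hlook0, if_neg (by omega : ¬ min k (1 : Int) = k)]
  -- split the outer loop at row 0
  have hrange : PySem.List.pyRange 0 (PySem.List.len data) 1
      = 0 :: PySem.List.pyRange 1 (PySem.List.len data) 1 := by
    rw [PySem.List.pyRange_one_cons (by rw [PySem.List.len_eq]; exact_mod_cast hm0)]
    norm_num
  have hA : generate_features data k none
      = (PySem.List.pyRange 0 (PySem.List.len data) 1).foldl (fun X i => pvBodyA data k none X i) [] := rfl
  have hB : generate_features_alt data k none
      = (PySem.List.pyRange 0 (PySem.List.len data) 1).foldl (fun X i => pvBodyB data k none X i) [] := rfl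
  have htail : (PySem.List.pyRange 1 (PySem.List.len data) 1).foldl (fun X i => pvBodyA data k none X i) []
      = (PySem.List.pyRange 1 (PySem.List.len data) 1).foldl (fun X i => pvBodyB data k none X i) [] := by
    apply PySem.List.foldl_congr_mem
    intro acc x hx
    rw [PySem.List.len_eq, PySem.List.mem_pyRange_one] at hx
    obtain ⟨pN, rfl⟩ : ∃ pN : Nat, x = (pN : Int) := ⟨x.toNat, by omega⟩
    refine pvRowEqCore data k none hk0 pN (by exact_mod_cast hx.2) ?_ acc
    rintro ⟨hf, -, -⟩
    have h1 := (pvPrev_full data (pN + 1)).mp hf 1 (List.mem_range.mpr (by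
      have : (1 : Int) ≤ (pN : Int) := hx.1
      omega))
    simp [pvContB] at h1
  intro heq
  rw [hA, hB, hrange, List.foldl_cons, List.foldl_cons,
    pvFoldlShape _ (fun acc i => pvBodyA_shape data k none acc i),
    pvFoldlShape _ (fun acc i => pvBodyB_shape data k none acc i), htail,
    hA0, hB0] at heq
  have := congrArg List.length heq
  simp at this
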